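-- pv_equiv track=rewrite | github.com/nabla-c0d3/nassl | nassl/debug_ssl_client.py | _openssl_str_to_dic
-- ===== SOURCE A (Python) =====
-- def _openssl_str_to_dic(s, param_tab='            '):
--     # type: (str, str) -> Dict[str, str]
--     """EDH and ECDH parameters pretty-printing.
--     """
--     d = {}
--     to_XML = lambda x : "_".join(m for m in x.replace('-', ' ').split(' '))
--     current_arg = None
--     for l in s.splitlines() :
--         if not l.startswith(param_tab) :
--             if current_arg :
--                 d[current_arg] = "0x"+d[current_arg].replace(':', '')
--                 current_arg = None
--             args = tuple(arg.strip() for arg in l.split(':') if arg.strip())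
--             if len(args) > 1 :
--                 # one line parameter
--                 d[to_XML(args[0])] = args[1]
--             else :
--                 # multi-line parameter
--                 current_arg = to_XML(args[0])
--                 d[current_arg] = ''
--         else :
--             d[current_arg] += l.strip()
--     if current_arg :
--         d[current_arg] = "0x"+d[current_arg].replace(':', '')
--     return d
-- ===== SOURCE B (Python) =====
-- def _openssl_str_to_dic(s, param_tab='            '):
--     """EDH and ECDH parameters pretty-printing (two-pass: group lines into records, then emit)."""
--     to_XML = lambda x: "_".join(m for m in x.replace('-', ' ').split(' '))
--     # pass 1: partition the lines into records (header, continuation lines)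
--     records = []
--     for line in s.splitlines():
--         if line.startswith(param_tab):
--             records[-1][1].append(line)
--         else:
--             records.append((line, []))
--     # pass 2: one dict entry per record
--     d = {}
--     for header, conts in records:
--         parts = [p.strip() for p in header.split(':') if p.strip()]
--         if len(parts) > 1:
--             d[to_XML(parts[0])] = parts[1]
--         else:
--             d[to_XML(parts[0])] = '0x' + ''.join(c.strip() for c in conts).replace(':', '')
--     return d
-- ===== Notes on version B (the rewrite author's own statement) =====
-- stated objective: alternative
-- what changed: A's single stateful pass (current_arg flag, writing a placeholder entry and patching d[key] with '0x'+… when the record closes) is replaced by two passes: first group the lines into (header, continuation-lines) records, then emit exactly one finished dict entry per record.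
-- outside the precondition, e.g. on _openssl_str_to_dic('    leading continuation', '    '): A raises KeyError, B raises IndexError; on _openssl_str_to_dic(':::', '    '): A raises IndexError, B raises IndexError
import Mathlib
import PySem

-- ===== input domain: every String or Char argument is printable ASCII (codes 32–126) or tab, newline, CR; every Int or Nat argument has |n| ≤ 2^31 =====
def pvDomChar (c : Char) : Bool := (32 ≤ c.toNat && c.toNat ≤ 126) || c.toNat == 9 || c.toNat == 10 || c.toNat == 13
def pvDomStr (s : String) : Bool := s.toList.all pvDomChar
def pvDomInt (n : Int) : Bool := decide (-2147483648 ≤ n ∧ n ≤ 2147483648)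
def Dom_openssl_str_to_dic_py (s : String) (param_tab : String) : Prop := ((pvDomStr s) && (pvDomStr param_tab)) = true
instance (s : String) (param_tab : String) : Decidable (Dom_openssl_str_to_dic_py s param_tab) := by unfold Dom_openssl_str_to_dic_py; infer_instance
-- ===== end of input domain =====

-- B replaces A's one-pass stateful parser by two passes (group the lines into records, then emit one
-- dict entry per record); same return value wherever A returns (Pre_); objective: alternative.

-- ===== PORT A =====
-- to_XML = lambda x : "_".join(m for m in x.replace('-', ' ').split(' '))  (the same lambda in both Pythons)
-- split? is s.split(sep); it is none only for sep = "", so the .getD [] below never fires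
def pvToXML (x : String) : String :=
  PySem.Str.join "_" ((PySem.Str.split? (PySem.Str.replace x "-" " ") " ").getD [])

-- args = tuple(arg.strip() for arg in l.split(':') if arg.strip())
def pvArgsA (l : String) : List String :=
  (((PySem.Str.split? l ":").getD []).map PySem.Str.strip).filter (· ≠ "")

-- the 'if current_arg : d[current_arg] = "0x"+d[current_arg].replace(':','')' block
def pvFinalize (d : PySem.Dict String String) : Option String → PySem.Dict String String
  | none => d
  | some k => d.insert k ("0x" ++ PySem.Str.replace (d.getD k "") ":" "")

-- one iteration of A's loop; state = (d, current_arg)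
def pvStepA (param_tab : String) (st : PySem.Dict String String × Option String) (l : String) :
    PySem.Dict String String × Option String :=
  if ¬ PySem.Str.startswith l param_tab then
    let d := pvFinalize st.1 st.2
    match pvArgsA l with
    | a :: b :: _ => (d.insert (pvToXML a) b, none)
    | [a] => (d.insert (pvToXML a) "", some (pvToXML a))
    | [] => (d, none)  -- Python: args[0] raises IndexError; excluded by Pre_
  else
    match st.2 with
    | some k => (st.1.insert k (st.1.getD k "" ++ PySem.Str.strip l), some k)
    | none => st  -- Python: d[None] raises KeyError; excluded by Pre_

def openssl_str_to_dic_py (s : String) (param_tab : String) : List (String × String) :=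
  let st := (PySem.Str.splitlines s).foldl (pvStepA param_tab) (PySem.Dict.empty, none)
  (pvFinalize st.1 st.2).items

-- ===== PORT B =====
-- pass 1: partition the lines into records (header, continuation lines)
def pvRecs (param_tab : String) : List String → List (String × List String)
  | [] => []
  | l :: rest =>
    (l, rest.takeWhile (fun t => PySem.Str.startswith t param_tab)) ::
      pvRecs param_tab (rest.dropWhile (fun t => PySem.Str.startswith t param_tab))
  termination_by ls => ls.length
  decreasing_by
    exact Nat.lt_succ_of_le (List.length_dropWhile_le _ _)

-- parts = [p.strip() for p in header.split(':') if p.strip()]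
def pvPartsB (h : String) : List String :=
  (((PySem.Str.split? h ":").getD []).filter (fun p => PySem.Str.strip p ≠ "")).map PySem.Str.strip

-- pass 2: one dict entry per record
def pvEmit (d : PySem.Dict String String) (r : String × List String) : PySem.Dict String String :=
  match pvPartsB r.1 with
  | a :: b :: _ => d.insert (pvToXML a) b
  | [a] => d.insert (pvToXML a)
      ("0x" ++ PySem.Str.replace (PySem.Str.join "" (r.2.map PySem.Str.strip)) ":" "")
  | [] => d  -- Python: parts[0] raises IndexError; excluded by Pre_

def openssl_str_to_dic_py_alt (s : String) (param_tab : String) : List (String × String) :=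
  ((pvRecs param_tab (PySem.Str.splitlines s)).foldl pvEmit PySem.Dict.empty).items

-- ===== PRECONDITION & SPEC =====
-- The record structure must be well-formed: every non-indented line must have a non-empty ':'-part
-- (else A's args[0] raises IndexError) and every indented line must continue an open multi-line
-- record (else A's d[None] += … raises KeyError).  These are exactly the inputs on which A raises;
-- no input on which A returns is excluded.
def pvPreAux (param_tab : String) : Bool → List String → Bool
  | _, [] => true
  | opened, l :: rest =>
    if PySem.Str.startswith l param_tab then
      opened && pvPreAux param_tab opened rest
    else
      match pvArgsA l with
      | [] => false
      | [_] => pvPreAux param_tab true rest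
      | _ => pvPreAux param_tab false rest

def Pre_openssl_str_to_dic_py (s : String) (param_tab : String) : Prop :=
  pvPreAux param_tab false (PySem.Str.splitlines s) = true

instance (s : String) (param_tab : String) : Decidable (Pre_openssl_str_to_dic_py s param_tab) := by
  unfold Pre_openssl_str_to_dic_py; infer_instance

def pvWitness_openssl_str_to_dic_py : String × String :=
  ("prime-field: yes\nP:\n    12:ab:\n    cd\nG: 2 (0x2)", "    ")

def Spec_openssl_str_to_dic_py (s : String) (param_tab : String) (out : List (String × String)) : Prop := out = openssl_str_to_dic_py_alt s param_tab
instance (s : String) (param_tab : String) (out : List (String × String)) : Decidable (Spec_openssl_str_to_dic_py s param_tab out) := by unfold Spec_openssl_str_to_dic_py; infer_instance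

-- ===== CLAIM (what is proved, stated in full; the proofs are below) =====
def Claim_equal_openssl_str_to_dic_py : Prop := ∀ (s : String) (param_tab : String), Dom_openssl_str_to_dic_py s param_tab → Pre_openssl_str_to_dic_py s param_tab → Spec_openssl_str_to_dic_py s param_tab (openssl_str_to_dic_py s param_tab)

-- ===== LEMMAS AND PROOFS =====

-- B's filter-then-strip parts list is A's strip-then-filter args tuple
theorem pvParts_eq (l : String) : pvPartsB l = pvArgsA l := by
  unfold pvPartsB pvArgsA
  rw [List.filter_map]
  rfl

theorem pvJoin_empty_nil : PySem.Str.join "" ([] : List String) = "" := by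
  apply String.ext
  simp [PySem.Str.toList_join, PySem.Chars.join_nil]

theorem pvJoin_empty_cons (x : String) (xs : List String) :
    PySem.Str.join "" (x :: xs) = x ++ PySem.Str.join "" xs := by
  have hemp : ("" : String).toList = [] := rfl
  cases xs with
  | nil =>
    apply String.ext
    simp [PySem.Str.toList_join, PySem.Chars.join_singleton, PySem.Chars.join_nil]
  | cons y ys =>
    apply String.ext
    simp [PySem.Str.toList_join, PySem.Chars.join_cons_cons, hemp]

-- evaluation lemmas for one step of A's loop
theorem pvStepA_cont (param_tab l : String)
    (hl : PySem.Str.startswith l param_tab = true)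
    (d : PySem.Dict String String) (k v : String) :
    pvStepA param_tab (d.insert k v, some k) l
      = (d.insert k (v ++ PySem.Str.strip l), some k) := by
  unfold pvStepA
  rw [hl]
  simp [PySem.Dict.getD_insert_self, PySem.Dict.insert_insert_self]

theorem pvStepA_hdr1 (param_tab l a : String)
    (hl : PySem.Str.startswith l param_tab = false) (harg : pvArgsA l = [a])
    (st : PySem.Dict String String × Option String) :
    pvStepA param_tab st l
      = ((pvFinalize st.1 st.2).insert (pvToXML a) "", some (pvToXML a)) := by
  unfold pvStepA
  rw [hl, harg]
  simp

theorem pvStepA_hdr2 (param_tab l a b : String) (tl : List String)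
    (hl : PySem.Str.startswith l param_tab = false) (harg : pvArgsA l = a :: b :: tl)
    (st : PySem.Dict String String × Option String) :
    pvStepA param_tab st l = ((pvFinalize st.1 st.2).insert (pvToXML a) b, none) := by
  unfold pvStepA
  rw [hl, harg]
  simp

-- A's step on a non-indented line first runs the finalize block, then works from current_arg = None
theorem pvStepA_header (param_tab : String) (st : PySem.Dict String String × Option String)
    (l : String) (hl : PySem.Str.startswith l param_tab = false) :
    pvStepA param_tab st l = pvStepA param_tab (pvFinalize st.1 st.2, none) l := by
  unfold pvStepA
  rw [hl]
  simp [pvFinalize]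

-- evaluation lemmas for the well-formedness predicate
theorem pvPreAux_cons_ind (param_tab l : String) (b : Bool) (rest : List String)
    (hl : PySem.Str.startswith l param_tab = true) :
    pvPreAux param_tab b (l :: rest) = (b && pvPreAux param_tab b rest) := by
  conv_lhs => rw [pvPreAux]
  rw [hl, if_pos rfl]

theorem pvPreAux_cons_hdr (param_tab l : String) (b : Bool) (rest : List String)
    (hl : PySem.Str.startswith l param_tab = false) :
    pvPreAux param_tab b (l :: rest)
      = (match pvArgsA l with
         | [] => false
         | [_] => pvPreAux param_tab true rest
         | _ => pvPreAux param_tab false rest) := by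
  conv_lhs => rw [pvPreAux]
  rw [hl, if_neg (by simp)]

-- folding A's step over a run of continuation lines appends their stripped text to d[k]
theorem pvContRun (param_tab : String) (ts : List String)
    (hts : ∀ t ∈ ts, PySem.Str.startswith t param_tab = true) :
    ∀ (d : PySem.Dict String String) (k v : String),
      ts.foldl (pvStepA param_tab) (d.insert k v, some k)
        = (d.insert k (v ++ PySem.Str.join "" (ts.map PySem.Str.strip)), some k) := by
  induction ts with
  | nil =>
    intro d k v
    rw [List.map_nil, pvJoin_empty_nil, String.append_empty, List.foldl_nil]
  | cons t ts ih =>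
    intro d k v
    have ht : PySem.Str.startswith t param_tab = true := hts t (by simp)
    rw [List.foldl_cons, pvStepA_cont param_tab t ht d k v,
        ih (fun t ht' => hts t (by simp [ht'])) d k _,
        List.map_cons, pvJoin_empty_cons, String.append_assoc]

-- once a multi-line record is open, the indented run does not affect well-formedness
theorem pvPreAux_skip (param_tab : String) (ts : List String)
    (hts : ∀ t ∈ ts, PySem.Str.startswith t param_tab = true) (rest : List String) :
    pvPreAux param_tab true (ts ++ rest) = pvPreAux param_tab true rest := by
  induction ts with
  | nil => rfl
  | cons t ts ih =>
    have ht := hts t (by simp)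
    rw [List.cons_append, pvPreAux_cons_ind param_tab t true (ts ++ rest) ht, Bool.true_and]
    exact ih (fun t ht' => hts t (by simp [ht']))

-- on a list whose head is non-indented, the 'open record' flag is irrelevant
theorem pvPreAux_head (param_tab : String) (b b' : Bool) : ∀ (ls : List String),
    (∀ x ∈ ls.head?, PySem.Str.startswith x param_tab = false) →
    pvPreAux param_tab b ls = pvPreAux param_tab b' ls := by
  intro ls h
  cases ls with
  | nil => rfl
  | cons x xs =>
    have hx : PySem.Str.startswith x param_tab = false := h x (by rfl)
    rw [pvPreAux_cons_hdr param_tab x b xs hx, pvPreAux_cons_hdr param_tab x b' xs hx]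

theorem pvDropWhile_head {α : Type} (p : α → Bool) : ∀ (ls : List α),
    ∀ x ∈ (ls.dropWhile p).head?, p x = false := by
  intro ls
  induction ls with
  | nil => simp
  | cons y ys ih =>
    intro x hx
    rw [List.dropWhile_cons] at hx
    by_cases hy : p y = true
    · rw [if_pos hy] at hx
      exact ih x hx
    · rw [if_neg hy] at hx
      simp at hx
      rw [← hx]
      simpa using hy

-- the main invariant: A's loop (plus its trailing finalize) equals B's record-wise fold, from any dict
theorem pvMain (param_tab : String) : ∀ (n : Nat) (ls : List String), ls.length ≤ n →
    ∀ (d : PySem.Dict String String), pvPreAux param_tab false ls = true →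
    pvFinalize (ls.foldl (pvStepA param_tab) (d, none)).1
        (ls.foldl (pvStepA param_tab) (d, none)).2
      = (pvRecs param_tab ls).foldl pvEmit d := by
  intro n
  induction n with
  | zero =>
    intro ls hlen d _
    have : ls = [] := List.length_eq_zero_iff.mp (Nat.le_zero.mp hlen)
    subst this
    simp [pvRecs, pvFinalize]
  | succ n ih =>
    intro ls hlen d hpre
    cases ls with
    | nil => simp [pvRecs, pvFinalize]
    | cons l rest =>
      by_cases hsw : PySem.Str.startswith l param_tab = true
      · rw [pvPreAux_cons_ind param_tab l false rest hsw] at hpre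
        simp at hpre
      · rw [Bool.not_eq_true] at hsw
        rw [pvPreAux_cons_hdr param_tab l false rest hsw] at hpre
        rcases harg : pvArgsA l with _ | ⟨a, _ | ⟨b, tl⟩⟩ <;> rw [harg] at hpre
        · -- no parts: excluded by Pre_
          exact absurd hpre (by simp)
        · -- single part: a multi-line record opens
          have hpre' : pvPreAux param_tab true rest = true := hpre
          have htsall : ∀ t ∈ rest.takeWhile (fun t => PySem.Str.startswith t param_tab),
              PySem.Str.startswith t param_tab = true := by
            intro t ht
            exact List.mem_takeWhile_imp (p := fun t => PySem.Str.startswith t param_tab) ht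
          have hhead : ∀ x ∈ (rest.dropWhile (fun t => PySem.Str.startswith t param_tab)).head?,
              PySem.Str.startswith x param_tab = false := by
            intro x hx
            exact pvDropWhile_head (fun t => PySem.Str.startswith t param_tab) rest x hx
          have hpre'' : pvPreAux param_tab false
              (rest.dropWhile (fun t => PySem.Str.startswith t param_tab)) = true := by
            rw [← pvPreAux_head param_tab true false _ hhead,
                ← pvPreAux_skip param_tab _ htsall _, List.takeWhile_append_dropWhile]
            exact hpre'
          have hlen' : (rest.dropWhile (fun t => PySem.Str.startswith t param_tab)).length ≤ n := by
            have h1 := List.length_dropWhile_le (fun t => PySem.Str.startswith t param_tab) rest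
            simp at hlen
            omega
          have hrun := pvContRun param_tab _ htsall d (pvToXML a) ""
          rw [String.empty_append] at hrun
          have hfin : pvFinalize
                (d.insert (pvToXML a) (PySem.Str.join ""
                  ((rest.takeWhile (fun t => PySem.Str.startswith t param_tab)).map PySem.Str.strip)))
                (some (pvToXML a))
              = d.insert (pvToXML a) ("0x" ++ PySem.Str.replace
                  (PySem.Str.join ""
                    ((rest.takeWhile (fun t => PySem.Str.startswith t param_tab)).map PySem.Str.strip))
                  ":" "") := by
            simp only [pvFinalize]
            rw [PySem.Dict.getD_insert_self, PySem.Dict.insert_insert_self]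
          have hB : pvEmit d (l, rest.takeWhile (fun t => PySem.Str.startswith t param_tab))
              = d.insert (pvToXML a) ("0x" ++ PySem.Str.replace
                  (PySem.Str.join ""
                    ((rest.takeWhile (fun t => PySem.Str.startswith t param_tab)).map PySem.Str.strip))
                  ":" "") := by
            unfold pvEmit
            rw [pvParts_eq, harg]
          have hsplitRec : pvRecs param_tab (l :: rest)
              = (l, rest.takeWhile (fun t => PySem.Str.startswith t param_tab)) ::
                  pvRecs param_tab (rest.dropWhile (fun t => PySem.Str.startswith t param_tab)) := by
            rw [pvRecs]
          rw [List.foldl_cons, pvStepA_hdr1 param_tab l a hsw harg (d, none)]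
          have hd : pvFinalize (d, (none : Option String)).1 (d, (none : Option String)).2 = d := rfl
          rw [hd]
          rw [show rest = rest.takeWhile (fun t => PySem.Str.startswith t param_tab) ++
                rest.dropWhile (fun t => PySem.Str.startswith t param_tab) from
              (List.takeWhile_append_dropWhile).symm]
          rw [List.foldl_append, hrun]
          rw [List.takeWhile_append_dropWhile] -- undo the split inside the takeWhile/dropWhile args
          cases hr' : rest.dropWhile (fun t => PySem.Str.startswith t param_tab) with
          | nil =>
            rw [hr'] at hsplitRec
            rw [List.foldl_nil, hfin, hsplitRec, List.foldl_cons, hB]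
            rw [show pvRecs param_tab [] = [] from by rw [pvRecs], List.foldl_nil]
          | cons x xs =>
            have hx : PySem.Str.startswith x param_tab = false := by
              apply hhead
              rw [hr']
              rfl
            rw [hr'] at hsplitRec hpre'' hlen'
            rw [List.foldl_cons, pvStepA_header param_tab _ x hx, hfin, ← List.foldl_cons,
                ih (x :: xs) hlen' _ hpre'', hsplitRec, List.foldl_cons, hB]
        · -- two or more parts: a one-line record
          have hpre' : pvPreAux param_tab false rest = true := hpre
          have htwdw : rest.takeWhile (fun t => PySem.Str.startswith t param_tab) = [] ∧
              rest.dropWhile (fun t => PySem.Str.startswith t param_tab) = rest := by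
            cases rest with
            | nil => exact ⟨rfl, rfl⟩
            | cons y ys =>
              have hy : PySem.Str.startswith y param_tab = false := by
                by_cases hy' : PySem.Str.startswith y param_tab = true
                · rw [pvPreAux_cons_ind param_tab y false ys hy'] at hpre'
                  simp at hpre'
                · simpa using hy'
              refine ⟨?_, ?_⟩
              · rw [List.takeWhile_cons, if_neg (by simp only [hy]; simp)]
              · rw [List.dropWhile_cons, if_neg (by simp only [hy]; simp)]
          obtain ⟨htw, hdw⟩ := htwdw
          have hlen' : rest.length ≤ n := by
            simp at hlen
            omega
          have hB : pvEmit d (l, ([] : List String)) = d.insert (pvToXML a) b := by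
            unfold pvEmit
            rw [pvParts_eq, harg]
          rw [List.foldl_cons, pvStepA_hdr2 param_tab l a b tl hsw harg (d, none)]
          have hd : pvFinalize (d, (none : Option String)).1 (d, (none : Option String)).2 = d := rfl
          rw [hd, ih rest hlen' _ hpre']
          rw [show pvRecs param_tab (l :: rest) = (l, []) :: pvRecs param_tab rest from by
            rw [pvRecs, htw, hdw]]
          rw [List.foldl_cons, hB]

-- ===== VERDICT (by name: the statement is the Claim_ definition above) =====
theorem openssl_str_to_dic_py_spec : Claim_equal_openssl_str_to_dic_py := by
  intro s param_tab _ hpre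
  unfold Spec_openssl_str_to_dic_py openssl_str_to_dic_py openssl_str_to_dic_py_alt
  exact congrArg PySem.Dict.items
    (pvMain param_tab (PySem.Str.splitlines s).length _ (Nat.le_refl _) PySem.Dict.empty hpre)
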